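/- GENERATED by mk_final_copies.py from the proof of the farm's unit `vorbis_deinit.1` (farm:vorbis_deinit.1.1: Lemmas.lean) as the
   re-elaboration sweep compiled it — do not edit. -/
/-
  Unit `vorbis_deinit.1` — the infrastructure shared by the walks of Proof.lean.

    at_next            the assertion `vorbis_deinit.At` at a later state, from the one at an earlier state and "nothing was stored
                       but in the callees' part of the frame" (`[e.rsp − 96, e.rsp − 40)`)
    at_read            a load at a state with `At` reads the entry memory (off the function's frame)
    rdf64 / rdf32 / rdf8   a machine load `m.readLE (w + k) n` is the typed read `m.u64 (w.toNat + k)` … of the field vocabulary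
    sext_shl / idx8 / idx32 / idxbook / next32 / cmp_int / part_toInt      the bit-level forms of `movsxd r, r32 ; shl r, k` and `add r32, 1` as numbers
-/
import Asan.CheckWalk
import Vorbis.Spec.Units.vorbis_deinit_1

open X86 X86.User Asan Vorbis Vorbis.Spec

set_option maxRecDepth 4000
set_option maxHeartbeats 4000000

namespace Vorbis.Spec.vorbis_deinit_1

/-- `(sp − k).toNat = sp.toNat − k` for a numeral `k` not above `sp`. -/
theorem word_sub_toNat (sp : Word) (k : Nat) (hk : k ≤ sp.toNat) :
    (sp - UInt64.ofNat k).toNat = sp.toNat - k := by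
  have hlt : k < 2 ^ 64 := by
    have := sp.toNat_lt
    omega
  have hle : (UInt64.ofNat k) ≤ sp := by
    rw [UInt64.le_iff_toNat_le, UInt64.toNat_ofNat', Nat.mod_eq_of_lt hlt]
    exact hk
  rw [UInt64.toNat_sub_of_le _ _ hle, UInt64.toNat_ofNat', Nat.mod_eq_of_lt hlt]

/-- A slot of the five saved registers reads the same after stores below them (`[e.rsp − 96, e.rsp − 40)`). -/
theorem slot_next {m m' : Mem} {sp : Word} {x : Nat} (k : Nat) (hk1 : 8 ≤ k) (hk2 : k ≤ 40) (hsp : 96 ≤ sp.toNat)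
    (hs : Mem.SameExcept [⟨sp.toNat - 96, sp.toNat - 40⟩] m m')
    (h : m.readLE (sp - UInt64.ofNat k) 8 = x) : m'.readLE (sp - UInt64.ofNat k) 8 = x := by
  have e := word_sub_toNat sp k (by omega)
  have hlt := sp.toNat_lt
  rw [hs.readLE (sp - UInt64.ofNat k) 8 (by omega) ?_]
  · exact h
  · intro w hw
    have e1 : w = ⟨sp.toNat - 96, sp.toNat - 40⟩ := List.mem_singleton.mp hw
    subst e1
    simp only
    omega

/-- **The assertion at the next cut point**: from `At` at the state `v`, at any state `s` whose memory is `v`'s except in the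
part of the frame below the five saved registers (the return addresses of the calls, the callees' frames), with the stack
pointer, `rbx` and `r15` as the assertion wants them. -/
theorem at_next {cut cut' : Word} {others : List Obj} {frames : List (Nat × FrameLayout)} {Blk : Block → Prop}
    {u₀ e v s : State} {ret : Word}
    (hat : vorbis_deinit.At cut others frames Blk u₀ e ret v)
    (hs : Mem.SameExcept [⟨(e.reg .rsp).toNat - 96, (e.reg .rsp).toNat - 40⟩] v.mem s.mem)
    (hrip : s.rip = cut') (hrsp : s.reg .rsp = e.reg .rsp - 40) (hrbx : s.reg .rbx = e.reg .rdi)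
    (hr15 : s.reg .r15 = v.reg .r15) (hcode : (conv u₀).code.In s.mem) (hinv : (conv u₀).inv s) :
    vorbis_deinit.At cut' others frames Blk u₀ e ret s := by
  have hroom := hat.entry.room
  simp only [vspec, conv_stackLo] at hroom
  have hsp : 96 ≤ (e.reg .rsp).toNat := by omega
  refine ⟨hat.entry, hat.pre, hrip, hrsp, hrbx, hr15.trans hat.r15, ?_, ?_, ?_, ?_, ?_, ?_, hcode, hinv⟩
  · exact slot_next 8 (by omega) (by omega) hsp hs hat.slot_r14
  · exact slot_next 16 (by omega) (by omega) hsp hs hat.slot_r13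
  · exact slot_next 24 (by omega) (by omega) hsp hs hat.slot_r12
  · exact slot_next 32 (by omega) (by omega) hsp hs hat.slot_rbp
  · exact slot_next 40 (by omega) (by omega) hsp hs hat.slot_rbx
  · apply hat.same.step_same hs
    intro w hw a h1 h2
    have e1 : w = ⟨(e.reg .rsp).toNat - 96, (e.reg .rsp).toNat - 40⟩ := List.mem_singleton.mp hw
    subst e1
    refine ⟨_, List.mem_singleton.mpr rfl, ?_, ?_⟩
    · exact h1
    · have : a < (e.reg .rsp).toNat - 40 := h2
      show a < (e.reg .rsp).toNat
      omega

/-- **A load at a cut point reads the entry memory**, off the function's 96 bytes of stack. -/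
theorem at_read {cut : Word} {others : List Obj} {frames : List (Nat × FrameLayout)} {Blk : Block → Prop}
    {u₀ e v : State} {ret : Word} (hat : vorbis_deinit.At cut others frames Blk u₀ e ret v) (a : Word) (n : Nat)
    (h64 : a.toNat + n < 2 ^ 64) (hoff : a.toNat + n ≤ (e.reg .rsp).toNat - 96 ∨ (e.reg .rsp).toNat ≤ a.toNat) :
    v.mem.readLE a n = e.mem.readLE a n := by
  apply hat.same.readLE a n h64
  intro w hw
  have e1 : w = ⟨(e.reg .rsp).toNat - 96, (e.reg .rsp).toNat⟩ := List.mem_singleton.mp hw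
  subst e1
  simp only
  exact hoff

/-- The machine's address form of a field: `addr (w.toNat + k) = w + k`. -/
theorem addr_off (w : Word) (k : Nat) : addr (w.toNat + k) = w + UInt64.ofNat k := by
  rw [← addr_add, addr_toNat]

/-- A 64-bit load at `w + k` is the typed read at the number `w.toNat + k`. -/
theorem rdf64 (m : Mem) (w : Word) (k : Nat) : m.readLE (w + UInt64.ofNat k) 8 = m.u64 (w.toNat + k) := by
  unfold Mem.u64
  rw [addr_off]

/-- A 32-bit load at `w + k` is the typed read at the number `w.toNat + k`. -/
theorem rdf32 (m : Mem) (w : Word) (k : Nat) : m.readLE (w + UInt64.ofNat k) 4 = m.u32 (w.toNat + k) := by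
  unfold Mem.u32
  rw [addr_off]

/-- A byte load at `w + k` is the typed read at the number `w.toNat + k`. -/
theorem rdf8 (m : Mem) (w : Word) (k : Nat) : m.readLE (w + UInt64.ofNat k) 1 = m.u8 (w.toNat + k) := by
  unfold Mem.u8
  rw [addr_off]

/-- `movsxd r, r32 ; shl r, k` of a non-negative `int` counter `x` (`x < 2^31`), as a number: `x · 2^k` (`k ≤ 5`). -/
theorem sext_shl (x : Word) (k : Nat) (hk : k ≤ 5) (h : x.toNat < 2 ^ 31) :
    (Word.ofBV (BitVec.signExtend 64 (Word.part Width.w32 x)) <<< (UInt64.ofNat k)).toNat = x.toNat * 2 ^ k := by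
  have hp : (Word.part Width.w32 x).toNat = x.toNat := by
    rw [Asan.part32_toNat]
    omega
  have hs := toNat_sext32 (Word.part Width.w32 x) (by omega)
  rw [hp] at hs
  have hk64 : (UInt64.ofNat k).toNat % 64 = k := by
    rw [UInt64.toNat_ofNat']
    omega
  rw [UInt64.toNat_shiftLeft, hs, hk64, Nat.shiftLeft_eq]
  have h2 : 2 ^ k ≤ 2 ^ 5 := Nat.pow_le_pow_right (by decide) hk
  have h3 : x.toNat * 2 ^ k ≤ x.toNat * 2 ^ 5 := Nat.mul_le_mul_left _ h2
  apply Nat.mod_eq_of_lt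
  omega

/-- The signed compare of the walker (`cmp [m32], r32 ; jg`): the counter `x < 2^31` against the loaded `int` `n`. -/
theorem cmp_int (x : Word) (n : Nat) (h : x.toNat < 2 ^ 31) (hn : n < 2 ^ 32) :
    ((Word.part Width.w32 x).toInt < (BitVec.ofNat 32 n).toInt) ↔ ((x.toNat : Int) < sint32 n) := by
  have hp : (Word.part Width.w32 x).toNat = x.toNat := by
    rw [Asan.part32_toNat]
    omega
  rw [toInt_ofNat32 n hn, toInt_of_lt _ (by omega), hp]

/-- `add r32, 1` on a counter below `2^31`: the register holds `x + 1`. -/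
theorem next32 (x : Word) (h : x.toNat < 2 ^ 31) :
    (Word.ofBV (Word.part Width.w32 x + 1#32)).toNat = x.toNat + 1 := by
  have hp : (Word.part Width.w32 x).toNat = x.toNat := by
    rw [Asan.part32_toNat]
    omega
  rw [toNat_ofBV32, BitVec.toNat_add, hp]
  have : (1#32 : BitVec 32).toNat = 1 := rfl
  rw [this]
  omega

/-- `movsxd r, r32 ; shl r, 3 ; add r, [m]`: the address of element `x` of a table of 8-byte words at `b`. -/
theorem idx8 (x : Word) (h : x.toNat < 2 ^ 31) (b : Nat) (hb : b + 8 * x.toNat < 2 ^ 64) :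
    (Word.ofBV (BitVec.signExtend 64 (Word.part Width.w32 x)) <<< (3 : Word) + UInt64.ofNat b).toNat = b + 8 * x.toNat := by
  have h3 : (Word.ofBV (BitVec.signExtend 64 (Word.part Width.w32 x)) <<< (3 : Word)).toNat = x.toNat * 2 ^ 3 :=
    sext_shl x 3 (by decide) h
  rw [UInt64.toNat_add, h3, UInt64.toNat_ofNat']
  omega

/-- `movsxd r, r32 ; shl r, 5 ; add r, [m]`: the address of element `x` of a table of 32-byte records at `b`. -/
theorem idx32 (x : Word) (h : x.toNat < 2 ^ 31) (b : Nat) (hb : b + 32 * x.toNat < 2 ^ 64) :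
    (Word.ofBV (BitVec.signExtend 64 (Word.part Width.w32 x)) <<< (5 : Word) + UInt64.ofNat b).toNat = b + 32 * x.toNat := by
  have h5 : (Word.ofBV (BitVec.signExtend 64 (Word.part Width.w32 x)) <<< (5 : Word)).toNat = x.toNat * 2 ^ 5 :=
    sext_shl x 5 (by decide) h
  rw [UInt64.toNat_add, h5, UInt64.toNat_ofNat']
  omega

/-- **Where a check site is**: in the data space, off the image's text, off the stack below `top`. -/
theorem site_place {others : List Obj} {frames : List (Nat × FrameLayout)} {top a n : Nat} {mem : Mem}
    (hs : Site (Live (stackObjs frames ++ others)) a n) (hinv : ShadowInv others frames top mem)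
    (hoff : ∀ o, o ∈ others → L.textHi ≤ o.base) (htop : 0x700000 < top) :
    0x119d40 ≤ a ∧ a + n ≤ 0xC00000 ∧ (top ≤ a ∨ a + n ≤ 0x700000 ∨ 0x800000 ≤ a) := by
  obtain ⟨B, hB, ⟨h1, h2⟩, hn⟩ := hs
  have hl : LiveBytes others frames a n := LiveBytes.of_block hB h1 h2
  exact hl.where_ hinv hoff (by omega) htop

/-- The signed reading of the low half of a counter below `2^31` is the counter. -/
theorem part_toInt (x : Word) (h : x.toNat < 2 ^ 31) : (Word.part Width.w32 x).toInt = (x.toNat : Int) := by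
  have hp : (Word.part Width.w32 x).toNat = x.toNat := by
    rw [Asan.part32_toNat]
    omega
  rw [toInt_of_lt _ (by omega), hp]

/-- **A load after a check call reads the entry memory**: through the return address the call pushed at `e.rsp − 48`, and off
the function's 96 bytes of stack; the address is known as the number `k`. -/
theorem rd_through {cut : Word} {others : List Obj} {frames : List (Nat × FrameLayout)} {Blk : Block → Prop}
    {u₀ e v : State} {ret : Word} (hat : vorbis_deinit.At cut others frames Blk u₀ e ret v) (a : Word) (c n k : Nat)
    (ha : a.toNat = k) (hk : k + n < 2 ^ 64)
    (hoff : k + n ≤ (e.reg .rsp).toNat - 96 ∨ (e.reg .rsp).toNat ≤ k) :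
    (v.mem.writeLE (e.reg .rsp - 48) 8 c).readLE a n = e.mem.readLE (addr k) n := by
  have hroom := hat.entry.room
  simp only [vspec, conv_stackLo] at hroom
  have hlt := (e.reg .rsp).toNat_lt
  have e48 : (e.reg .rsp - 48).toNat = (e.reg .rsp).toNat - 48 := word_sub_toNat (e.reg .rsp) 48 (by omega)
  rw [Mem.readLE_writeLE_disjoint_noWrap _ _ _ _ _ _ (by unfold Mem.NoWrap; omega) (by unfold Mem.NoWrap; omega) (by omega)]
  rw [at_read hat a n (by omega) (by omega), eq_addr a k ha]

/-- `movzx eax, byte [m] ; imul rax, rax, 2120 ; add rbp, rax ; lea rdi, [rbp + 4]`: the address of `codebooks[bk].entries`. -/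
theorem idxbook (cb bk : Nat) (hbk : bk < 256) (h : cb + 2120 * bk + 4 < 2 ^ 64) :
    (UInt64.ofNat cb + Word.ofBV (BitVec.setWidth 64 (BitVec.zeroExtend 32 (BitVec.ofNat 8 bk))) * (2120 : Word)
      + (4 : Word)).toNat = cb + 2120 * bk + 4 := by
  have e1 : (BitVec.setWidth 64 (BitVec.zeroExtend 32 (BitVec.ofNat 8 bk))).toNat = bk := by
    simp only [BitVec.toNat_setWidth, BitVec.truncate_eq_setWidth, BitVec.toNat_ofNat]
    omega
  rw [ofBV_eq_addr _ (Nat.le_refl 64), e1]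
  have e2 : (2120 : Word) = addr 2120 := rfl
  have e3 : (4 : Word) = addr 4 := rfl
  have e4 : UInt64.ofNat cb = addr cb := rfl
  rw [e2, e3, e4, addr_mul_addr, addr_add_addr, addr_add_addr, toNat_addr _ (by omega)]
  omega

/-- **Where a check site is, relative to the function's stack**: in the data space, and off the 96 bytes below the entry stack
pointer `sp` (`top = sp + 8`). The two-way form of `site_place`, cheaper for `u_omega`. -/
theorem site_off {others : List Obj} {frames : List (Nat × FrameLayout)} {sp a n : Nat} {mem : Mem}
    (hs : Site (Live (stackObjs frames ++ others)) a n) (hinv : ShadowInv others frames (sp + 8) mem)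
    (hoff : ∀ o, o ∈ others → L.textHi ≤ o.base) (hroom : 0x700000 + 96 ≤ sp) (htop : sp + 8 ≤ 0x800000) :
    0x119d40 ≤ a ∧ a + n ≤ 0xC00000 ∧ (a + n ≤ sp - 96 ∨ sp ≤ a) := by
  have h := site_place hs hinv hoff (by omega)
  omega

end Vorbis.Spec.vorbis_deinit_1
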